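-- pv_equiv track=rewrite | github.com/sweiyang/frontier | perf_test/scripts/concurrent_api_stress_test.py | generate_concurrency_levels
-- ===== SOURCE A (Python) =====
-- from typing import List, Dict, Any, Optional, Tuple
--
-- def generate_concurrency_levels(max_concurrency: int) -> List[int]:
--     """
--     Generate concurrency levels with adaptive step sizes:
--       5→50:   step=5   (fine-grained, find initial curve)
--       50→200:  step=25  (moderate, capture plateau)
--       200→500: step=50  (coarse, diminishing returns zone)
--       500→1000:step=100 (jump, industrially meaningless zone)
--     """
--     levels = []
--     c = 5
--     while c <= min(max_concurrency, 50):
--         levels.append(c)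
--         c += 5
--     c = 75
--     while c <= min(max_concurrency, 200):
--         levels.append(c)
--         c += 25
--     c = 250
--     while c <= min(max_concurrency, 500):
--         levels.append(c)
--         c += 50
--     c = 600
--     while c <= min(max_concurrency, 1000):
--         levels.append(c)
--         c += 100
--     return sorted(set(levels))
-- ===== SOURCE B (Python) =====
-- LEVELS = (list(range(5, 51, 5)) + list(range(75, 201, 25))
--           + list(range(250, 501, 50)) + list(range(600, 1001, 100)))
--
-- def generate_concurrency_levels(max_concurrency: int):
--     return [x for x in LEVELS if x <= max_concurrency]
-- ===== Notes on version B (the rewrite author's own statement) =====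
-- stated objective: simpler
-- what changed: B replaces the four adaptive while-loops plus sorted(set(...)) by filtering a fixed precomputed table of all levels with a single x <= max_concurrency comparison.
import Mathlib
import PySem

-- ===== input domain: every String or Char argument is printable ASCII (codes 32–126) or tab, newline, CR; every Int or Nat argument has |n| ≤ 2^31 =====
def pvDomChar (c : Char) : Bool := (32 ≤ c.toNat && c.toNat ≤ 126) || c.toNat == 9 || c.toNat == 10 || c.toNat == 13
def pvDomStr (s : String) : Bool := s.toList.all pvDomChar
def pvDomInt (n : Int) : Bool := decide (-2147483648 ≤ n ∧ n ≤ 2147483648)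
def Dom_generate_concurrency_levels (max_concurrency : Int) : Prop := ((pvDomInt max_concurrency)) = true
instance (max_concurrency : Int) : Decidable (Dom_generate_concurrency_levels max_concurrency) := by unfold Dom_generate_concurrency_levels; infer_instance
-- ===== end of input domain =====

-- B replaces A's four adaptive while-loops + sorted(set(...)) by filtering a fixed
-- constant table with `x <= max_concurrency` (objective: simpler).


-- ===== PORT A =====
-- `while c <= bound: levels.append(c); c += step` (the `1 ≤ step` conjunct is only a
-- totality guard; every call site uses a positive literal step, so behaviour is identical)
-- fuel = (bound + 1 - c).toNat bounds the iteration count (each step adds ≥ 1),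
-- so the fuel-based structural recursion runs exactly Python's loop
def pvLoopA (fuel : Nat) (c bound step : Int) (levels : List Int) : List Int :=
  match fuel with
  | 0 => levels
  | f + 1 =>
    if c ≤ bound then pvLoopA f (c + step) bound step (levels ++ [c]) else levels

def pvRun (c bound step : Int) (levels : List Int) : List Int :=
  pvLoopA (bound + 1 - c).toNat c bound step levels

def generate_concurrency_levels (max_concurrency : Int) : List Int :=
  PySem.List.sorted
    (PySem.Set.ofList
      (pvRun 600 (min max_concurrency 1000) 100
        (pvRun 250 (min max_concurrency 500) 50
          (pvRun 75 (min max_concurrency 200) 25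
            (pvRun 5 (min max_concurrency 50) 5 [])))))
    (fun x => x) false

-- ===== PORT B =====
def pvLEVELS : List Int :=
  [5, 10, 15, 20, 25, 30, 35, 40, 45, 50,
   75, 100, 125, 150, 175, 200,
   250, 300, 350, 400, 450, 500,
   600, 700, 800, 900, 1000]

def generate_concurrency_levels_alt (max_concurrency : Int) : List Int :=
  pvLEVELS.filter (fun x => x ≤ max_concurrency)

-- ===== PRECONDITION & SPEC =====
def Spec_generate_concurrency_levels (max_concurrency : Int) (out : List Int) : Prop := out = generate_concurrency_levels_alt max_concurrency
instance (max_concurrency : Int) (out : List Int) : Decidable (Spec_generate_concurrency_levels max_concurrency out) := by unfold Spec_generate_concurrency_levels; infer_instance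

-- ===== CLAIM (what is proved, stated in full; the proofs are below) =====
def Claim_equal_generate_concurrency_levels : Prop := ∀ (max_concurrency : Int), Dom_generate_concurrency_levels max_concurrency → Spec_generate_concurrency_levels max_concurrency (generate_concurrency_levels max_concurrency)

-- ===== LEMMAS AND PROOFS =====

-- the result depends on max_concurrency only through its clamp into [4, 1000]
theorem pvA_eq_clamp (m : Int) (hm : 1000 ≤ m) :
    generate_concurrency_levels m = generate_concurrency_levels 1000 := by
  unfold generate_concurrency_levels
  rw [show min m 50 = min (1000:Int) 50 by omega,
      show min m 200 = min (1000:Int) 200 by omega,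
      show min m 500 = min (1000:Int) 500 by omega,
      show min m 1000 = min (1000:Int) 1000 by omega]

theorem pvB_eq_clamp (m : Int) (hm : 1000 ≤ m) :
    generate_concurrency_levels_alt m = generate_concurrency_levels_alt 1000 := by
  unfold generate_concurrency_levels_alt
  apply List.filter_congr
  intro x hx
  fin_cases hx <;> simp <;> omega

theorem pvRun_stop (c bound step : Int) (l : List Int) (h : ¬ c ≤ bound) :
    pvRun c bound step l = l := by
  unfold pvRun
  rw [show (bound + 1 - c).toNat = 0 by omega]
  rfl

theorem pvA_eq_low (m : Int) (hm : m ≤ 4) :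
    generate_concurrency_levels m = [] := by
  unfold generate_concurrency_levels
  rw [pvRun_stop _ _ _ _ (by omega), pvRun_stop _ _ _ _ (by omega),
      pvRun_stop _ _ _ _ (by omega), pvRun_stop _ _ _ _ (by omega)]
  rfl

theorem pvB_eq_low (m : Int) (hm : m ≤ 4) :
    generate_concurrency_levels_alt m = [] := by
  unfold generate_concurrency_levels_alt
  apply List.filter_eq_nil_iff.mpr
  intro x hx
  fin_cases hx <;> simp <;> omega

set_option maxRecDepth 100000 in
theorem pv_mid : ∀ k ∈ List.range 996,
    generate_concurrency_levels (5 + k) = generate_concurrency_levels_alt (5 + k) := by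
  decide

-- ===== VERDICT (by name: the statement is the Claim_ definition above) =====
theorem generate_concurrency_levels_spec : Claim_equal_generate_concurrency_levels := by
  intro m _
  unfold Spec_generate_concurrency_levels
  by_cases h : m ≤ 4
  · rw [pvA_eq_low m h, pvB_eq_low m h]
  · by_cases h2 : 1000 ≤ m
    · rw [pvA_eq_clamp m h2, pvB_eq_clamp m h2]
      exact pv_mid 995 (List.mem_range.mpr (by omega))
    · have hk : m = 5 + ((m - 5).toNat : Int) := by omega
      rw [hk]
      exact pv_mid (m - 5).toNat (List.mem_range.mpr (by omega))
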